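-- pv_equiv track=rewrite | github.com/Amborsia/BaekjoonHub | goormlevel/88520/1. 놀이공원/놀이공원.py | min_waste_in_area
-- ===== SOURCE A (Python) =====
-- def min_waste_in_area(N, K, grid):
--     # 누적 합 배열 초기화
--     prefix_sum = [[0] * (N + 1) for _ in range(N + 1)]
--
--     # 누적 합 배열 채우기
--     for i in range(1, N + 1):
--         for j in range(1, N + 1):
--             prefix_sum[i][j] = grid[i-1][j-1] + prefix_sum[i-1][j] + prefix_sum[i][j-1] - prefix_sum[i-1][j-1]
--
--     min_waste = float('inf')
--
--     # 각 좌표에서 KxK 영역의 폐기물 수 계산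
--     for i in range(K, N + 1):
--         for j in range(K, N + 1):
--             total_waste = prefix_sum[i][j] - prefix_sum[i-K][j] - prefix_sum[i][j-K] + prefix_sum[i-K][j-K]
--             min_waste = min(min_waste, total_waste)
--
--     return min_waste
-- ===== SOURCE B (Python) =====
-- def min_waste_in_area(N, K, grid):
--     # Separable two-pass sliding window instead of a summed-area table:
--     # per-row horizontal K-window sums (rolling), then vertical sums over K rows.
--     W = N - K + 1
--     h = []
--     for r in range(N):
--         row = grid[r]
--         s = sum(row[:K])
--         ws = [s]
--         for j in range(K, N):
--             s += row[j] - row[j - K]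
--             ws.append(s)
--         h.append(ws)
--     vals = [sum(h[r + t][c] for t in range(K)) for r in range(W) for c in range(W)]
--     return min(vals)
-- ===== Notes on version B (the rewrite author's own statement) =====
-- stated objective: alternative
-- what changed: Replaces the (N+1)x(N+1) summed-area table with inclusion-exclusion lookups by a separable two-pass window sum: per-row horizontal K-window sums, then vertical sums of K consecutive row-window values, taking min over all complete KxK windows.
-- outside the precondition, e.g. on min_waste_in_area(1, 2, [[3]]): A returns inf, B raises ValueError
import Mathlib
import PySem

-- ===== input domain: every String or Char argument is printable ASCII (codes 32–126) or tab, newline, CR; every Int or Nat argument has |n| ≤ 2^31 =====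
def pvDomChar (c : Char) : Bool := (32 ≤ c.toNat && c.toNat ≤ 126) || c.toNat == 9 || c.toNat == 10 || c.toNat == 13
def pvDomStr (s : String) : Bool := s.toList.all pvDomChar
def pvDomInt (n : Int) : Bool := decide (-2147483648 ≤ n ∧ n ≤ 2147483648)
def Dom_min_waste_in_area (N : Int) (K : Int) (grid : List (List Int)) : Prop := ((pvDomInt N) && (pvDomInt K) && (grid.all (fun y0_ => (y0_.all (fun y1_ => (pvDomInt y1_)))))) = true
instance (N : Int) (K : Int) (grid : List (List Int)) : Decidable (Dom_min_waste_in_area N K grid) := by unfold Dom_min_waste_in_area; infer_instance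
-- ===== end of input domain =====

-- B replaces A's summed-area table by a separable two-pass sliding-window sum (per-row
-- horizontal K-window sums, then vertical sums over K rows); same result, no speed claim.


-- ===== PORT A =====
-- shared 2D index helper: xs[i][j] (nonnegative and in range under Pre_)
def pvGet2 (t : List (List Int)) (i j : Int) : Int :=
  ((PySem.List.pyGet? ((PySem.List.pyGet? t i).getD []) j).getD 0)

-- prefix_sum[i][j] = v (i, j nonnegative and in range under Pre_)
def pvSet2 (t : List (List Int)) (i j : Nat) (v : Int) : List (List Int) :=
  t.set i ((t.getD i []).set j v)

-- one assignment of A's filling loop body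
def pvStepA (grid t : List (List Int)) (i j : Int) : List (List Int) :=
  pvSet2 t i.toNat j.toNat
    (pvGet2 grid (i-1) (j-1) + pvGet2 t (i-1) j + pvGet2 t i (j-1) - pvGet2 t (i-1) (j-1))

-- the filled prefix-sum table (A's first double loop)
def pvTableA (N : Int) (grid : List (List Int)) : List (List Int) :=
  (PySem.List.pyRange 1 (N+1) 1).foldl
    (fun t i => (PySem.List.pyRange 1 (N+1) 1).foldl (fun t j => pvStepA grid t i j) t)
    (List.replicate (N+1).toNat (List.replicate (N+1).toNat 0))

-- min_waste = min(min_waste, total); the float('inf') start is modelled as `none`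
def pvMinStep (acc : Option Int) (t : Int) : Option Int :=
  some (match acc with | none => t | some m => min m t)

def min_waste_in_area (N : Int) (K : Int) (grid : List (List Int)) : Int :=
  let ps := pvTableA N grid
  (((PySem.List.pyRange K (N+1) 1).foldl
      (fun acc i => (PySem.List.pyRange K (N+1) 1).foldl
        (fun acc j =>
          pvMinStep acc (pvGet2 ps i j - pvGet2 ps (i-K) j - pvGet2 ps i (j-K) + pvGet2 ps (i-K) (j-K)))
        acc)
      none).getD 0)  -- the getD 0 is unreachable under Pre_ (K ≤ N makes the loop nonempty)

-- ===== PORT B =====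
-- row[j] with default (indices nonnegative and in range under Pre_)
def pvGetI (row : List Int) (j : Int) : Int := (PySem.List.pyGet? row j).getD 0

def min_waste_in_area_alt (N : Int) (K : Int) (grid : List (List Int)) : Int :=
  let W := N - K + 1
  let h := (PySem.List.pyRange 0 N 1).foldl (fun h r =>
      let row := (PySem.List.pyGet? grid r).getD []
      let s := ((PySem.List.pyRange 0 K 1).map (fun b => pvGetI row b)).sum
      let sws := (PySem.List.pyRange K N 1).foldl
        (fun (sws : Int × List Int) j =>
          let s' := sws.1 + pvGetI row j - pvGetI row (j - K)
          (s', sws.2 ++ [s']))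
        (s, [s])
      h ++ [sws.2]) []
  let vals := (PySem.List.pyRange 0 W 1).flatMap (fun r =>
      (PySem.List.pyRange 0 W 1).map (fun c =>
        ((PySem.List.pyRange 0 K 1).map (fun t => pvGet2 h (r + t) c)).sum))
  (PySem.List.min? vals (fun y => y)).getD 0  -- getD 0 unreachable under Pre_ (vals nonempty)

-- ===== PRECONDITION & SPEC =====
-- Pre_ restricts to the task's natural domain: 0 ≤ K ≤ N and a grid with at least N rows of at
-- least N entries each (all that A reads). Outside it A raises IndexError (grid too small, or
-- K < 0, where j-K overruns the table) or returns float('inf') (K > N), which is not an int.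
def Pre_min_waste_in_area (N : Int) (K : Int) (grid : List (List Int)) : Prop :=
  0 ≤ K ∧ K ≤ N ∧ N.toNat ≤ grid.length ∧ ∀ row ∈ grid.take N.toNat, N.toNat ≤ row.length
instance (N : Int) (K : Int) (grid : List (List Int)) : Decidable (Pre_min_waste_in_area N K grid) := by
  unfold Pre_min_waste_in_area; infer_instance

def pvWitness_min_waste_in_area : Int × Int × List (List Int) := (2, 1, [[1, 2], [3, 4]])

def Spec_min_waste_in_area (N : Int) (K : Int) (grid : List (List Int)) (out : Int) : Prop := out = min_waste_in_area_alt N K grid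
instance (N : Int) (K : Int) (grid : List (List Int)) (out : Int) : Decidable (Spec_min_waste_in_area N K grid out) := by unfold Spec_min_waste_in_area; infer_instance

-- ===== CLAIM (what is proved, stated in full; the proofs are below) =====
def Claim_equal_min_waste_in_area : Prop := ∀ (N : Int) (K : Int) (grid : List (List Int)), Dom_min_waste_in_area N K grid → Pre_min_waste_in_area N K grid → Spec_min_waste_in_area N K grid (min_waste_in_area N K grid)

-- ===== LEMMAS AND PROOFS =====

-- Nat-level 2D access and the mathematical prefix / block sums both ports compute
def pvG (t : List (List Int)) (a b : Nat) : Int := (t.getD a []).getD b 0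

def pvRowSum (grid : List (List Int)) (i j : Nat) : Int :=
  ((List.range j).map (fun b => pvG grid i b)).sum

def pvP (grid : List (List Int)) (i j : Nat) : Int :=
  ((List.range i).map (fun a => pvRowSum grid a j)).sum

def pvS (grid : List (List Int)) (k r c : Nat) : Int :=
  ((List.range k).map (fun t => ((List.range k).map (fun b => pvG grid (r+t) (c+b))).sum)).sum

def pvShape (t : List (List Int)) (m : Nat) : Prop :=
  t.length = m ∧ ∀ l ∈ t, l.length = m

lemma pvGet2_natCast (t : List (List Int)) (a b : Nat) : pvGet2 t (a:Int) (b:Int) = pvG t a b := by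
  simp [pvGet2, pvG, PySem.List.pyGet?_natCast, List.getD_eq_getElem?_getD]

lemma pvShape_rowlen {t : List (List Int)} {m : Nat} (h : pvShape t m) (i : Nat) (hi : i < m) :
    (t.getD i []).length = m := by
  obtain ⟨hl, hr⟩ := h
  have hi' : i < t.length := by omega
  rw [List.getD_eq_getElem?_getD, List.getElem?_eq_getElem hi']
  exact hr _ (List.getElem_mem hi')

lemma pvShape_pvSet2 {t : List (List Int)} {m : Nat} (h : pvShape t m) {a b : Nat} (ha : a < m)
    (v : Int) : pvShape (pvSet2 t a b v) m := by
  obtain ⟨hl, hr⟩ := h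
  refine ⟨by simp [pvSet2, hl], ?_⟩
  intro l hlmem
  rcases List.mem_or_eq_of_mem_set hlmem with hmem | rfl
  · exact hr _ hmem
  · rw [List.length_set]
    exact pvShape_rowlen ⟨hl, hr⟩ a ha

lemma pvG_pvSet2 {t : List (List Int)} {m : Nat} (h : pvShape t m) {a b : Nat} (ha : a < m)
    (hb : b < m) (v : Int) (i j : Nat) :
    pvG (pvSet2 t a b v) i j = if i = a ∧ j = b then v else pvG t i j := by
  have hal : a < t.length := h.1 ▸ ha
  have hbl : b < (t.getD a []).length := by rw [pvShape_rowlen h a ha]; exact hb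
  rw [List.getD_eq_getElem?_getD] at hbl
  simp only [pvG, pvSet2, List.getD_eq_getElem?_getD, List.getElem?_set]
  by_cases hia : a = i
  · subst hia
    rw [if_pos rfl, if_pos hal, Option.getD_some]
    by_cases hjb : j = b
    · rw [if_pos ⟨rfl, hjb⟩, List.getElem?_set, if_pos hjb.symm]
      subst hjb
      rw [if_pos hbl, Option.getD_some]
    · rw [if_neg (fun hh => hjb hh.2), List.getElem?_set, if_neg (fun hh => hjb hh.symm)]
  · rw [if_neg hia, if_neg (fun hh => hia hh.1.symm)]

lemma pvShape_replicate (m : Nat) :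
    pvShape (List.replicate m (List.replicate m (0:Int))) m := by
  refine ⟨by simp, ?_⟩
  intro l hl
  rw [List.eq_of_mem_replicate hl]; simp

lemma pvG_replicate (m i j : Nat) :
    pvG (List.replicate m (List.replicate m (0:Int))) i j = 0 := by
  simp only [pvG, List.getD_eq_getElem?_getD, List.getElem?_replicate]
  by_cases hi : i < m <;> by_cases hj : j < m <;> simp [hi, hj]

lemma pvRowSum_succ (grid : List (List Int)) (i j : Nat) :
    pvRowSum grid i (j+1) = pvRowSum grid i j + pvG grid i j := by
  simp [pvRowSum, List.range_succ]

lemma pvP_succ (grid : List (List Int)) (i j : Nat) :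
    pvP grid (i+1) j = pvP grid i j + pvRowSum grid i j := by
  simp [pvP, List.range_succ]

lemma pvP_zero_right (grid : List (List Int)) (i : Nat) : pvP grid i 0 = 0 := by
  simp [pvP, pvRowSum]

lemma pvP_rec (grid : List (List Int)) (r c : Nat) :
    pvP grid (r+1) (c+1) = pvG grid r c + pvP grid r (c+1) + pvP grid (r+1) c - pvP grid r c := by
  simp only [pvP_succ, pvRowSum_succ]
  ring

lemma pvRowSum_add (grid : List (List Int)) (i c k : Nat) :
    pvRowSum grid i (c+k) =
      pvRowSum grid i c + ((List.range k).map (fun b => pvG grid i (c+b))).sum := by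
  simp [pvRowSum, List.range_add, List.map_map, Function.comp_def]

lemma pvP_add (grid : List (List Int)) (r k j : Nat) :
    pvP grid (r+k) j =
      pvP grid r j + ((List.range k).map (fun t => pvRowSum grid (r+t) j)).sum := by
  simp [pvP, List.range_add, List.map_map, Function.comp_def]

lemma pvP_block (grid : List (List Int)) (k r c : Nat) :
    pvP grid (r+k) (c+k) - pvP grid r (c+k) - pvP grid (r+k) c + pvP grid r c
      = pvS grid k r c := by
  simp only [pvP_add, pvS, pvRowSum_add, PySem.List.sum_map_add_int]
  ring

lemma foldl_pvMinStep_some (l : List Int) (m : Int) :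
    l.foldl pvMinStep (some m) = some (l.foldl min m) := by
  induction l generalizing m with
  | nil => rfl
  | cons x t ih => simp only [List.foldl_cons, pvMinStep]; exact ih (min m x)

lemma foldl_nested_min (f : Nat → Nat → Int) (w : Nat) (init : Option Int) :
    (List.range w).foldl
        (fun acc r => (List.range w).foldl (fun acc c => pvMinStep acc (f r c)) acc) init
      = ((List.range w).flatMap (fun r => (List.range w).map (f r))).foldl pvMinStep init := by
  rw [List.foldl_flatMap]
  simp [List.foldl_map]

lemma pvFlatMap_congr (w : Nat) (f g : Nat → Nat → Int)
    (h : ∀ r, r < w → ∀ c, c < w → f r c = g r c) :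
    (List.range w).flatMap (fun r => (List.range w).map (f r)) =
      (List.range w).flatMap (fun r => (List.range w).map (g r)) := by
  apply List.flatMap_congr
  intro r hr
  apply List.map_congr_left
  intro c hc
  exact h r (List.mem_range.mp hr) c (List.mem_range.mp hc)

-- horizontal window sum of width k at offset c (B's per-row rolling quantity)
def pvWin (row : List Int) (k c : Nat) : Int :=
  ((List.range k).map (fun b => row.getD (c+b) 0)).sum

lemma pvWin_zero (row : List Int) (k : Nat) :
    pvWin row k 0 = ((List.range k).map (fun b => row.getD b 0)).sum := by
  simp [pvWin]

lemma pvWin_step (row : List Int) (k m : Nat) :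
    pvWin row k (m+1) = pvWin row k m + row.getD (k+m) 0 - row.getD m 0 := by
  unfold pvWin
  have h1 : ((List.range (k+1)).map (fun b => row.getD (m+b) 0)).sum
      = ((List.range k).map (fun b => row.getD (m+b) 0)).sum + row.getD (m+k) 0 := by
    rw [List.range_succ]; simp
  have h2 : ((List.range (k+1)).map (fun b => row.getD (m+b) 0)).sum
      = row.getD m 0 + ((List.range k).map (fun b => row.getD (m+1+b) 0)).sum := by
    rw [List.range_succ_eq_map]
    simp only [List.map_cons, List.sum_cons, List.map_map, Function.comp_def]
    rw [Nat.add_zero]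
    congr 2
    apply List.map_congr_left
    intro b _
    rw [show m + (b+1) = m+1+b from by omega]
  rw [show k+m = m+k from Nat.add_comm k m]
  omega

-- B's rolling per-row pass produces exactly the window sums
lemma pvRollFold (row : List Int) (k : Nat) (m : Nat) :
    (List.range m).foldl
        (fun (sws : Int × List Int) (c : Nat) =>
          (sws.1 + row.getD (k+c) 0 - row.getD c 0,
           sws.2 ++ [sws.1 + row.getD (k+c) 0 - row.getD c 0]))
        (pvWin row k 0, [pvWin row k 0])
      = (pvWin row k m, (List.range (m+1)).map (pvWin row k)) := by
  induction m with
  | zero => simp [List.range_one]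
  | succ m ih =>
    rw [List.range_succ, List.foldl_append, ih, List.foldl_cons, List.foldl_nil]
    have hs : pvWin row k m + row.getD (k+m) 0 - row.getD m 0 = pvWin row k (m+1) := by
      rw [pvWin_step]
    rw [hs]
    simp [List.range_succ]

-- column pass of A's filling loop: processes row R+1 up to column C
lemma pvColPass (grid : List (List Int)) (n R : Nat) (hR : R < n) :
    ∀ (C : Nat), C ≤ n → ∀ (t : List (List Int)), pvShape t (n+1) →
    (∀ i j, i ≤ n → j ≤ n → pvG t i j = if i ≤ R then pvP grid i j else 0) →
    pvShape ((List.range C).foldl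
        (fun t c => pvSet2 t (R+1) (c+1)
          (pvG grid R c + pvG t R (c+1) + pvG t (R+1) c - pvG t R c)) t) (n+1) ∧
    ∀ i j, i ≤ n → j ≤ n →
      pvG ((List.range C).foldl
        (fun t c => pvSet2 t (R+1) (c+1)
          (pvG grid R c + pvG t R (c+1) + pvG t (R+1) c - pvG t R c)) t) i j =
      if i ≤ R ∨ (i = R+1 ∧ j ≤ C) then pvP grid i j else 0 := by
  intro C
  induction C with
  | zero =>
    intro _ t hsh hval
    simp only [List.range_zero, List.foldl_nil]
    refine ⟨hsh, ?_⟩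
    intro i j hi hj
    rw [hval i j hi hj]
    by_cases h1 : i ≤ R
    · rw [if_pos h1, if_pos (Or.inl h1)]
    · rw [if_neg h1]
      by_cases h2 : i = R+1 ∧ j ≤ 0
      · rw [if_pos (Or.inr h2), show j = 0 from by omega, pvP_zero_right]
      · rw [if_neg (by tauto)]
  | succ C ih =>
    intro hC t hsh hval
    have hC' : C ≤ n := by omega
    obtain ⟨hsh', hval'⟩ := ih hC' t hsh hval
    rw [List.range_succ, List.foldl_append, List.foldl_cons, List.foldl_nil]
    set t' := (List.range C).foldl
        (fun t c => pvSet2 t (R+1) (c+1)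
          (pvG grid R c + pvG t R (c+1) + pvG t (R+1) c - pvG t R c)) t with ht'
    have hv1 : pvG t' R (C+1) = pvP grid R (C+1) := by
      rw [hval' R (C+1) (by omega) (by omega)]; simp
    have hv2 : pvG t' (R+1) C = pvP grid (R+1) C := by
      rw [hval' (R+1) C (by omega) (by omega)]
      simp [show ¬ (R+1 ≤ R) from by omega]
    have hv3 : pvG t' R C = pvP grid R C := by
      rw [hval' R C (by omega) (by omega)]; simp
    have hnew : pvG grid R C + pvG t' R (C+1) + pvG t' (R+1) C - pvG t' R C
        = pvP grid (R+1) (C+1) := by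
      rw [hv1, hv2, hv3, pvP_rec]
    constructor
    · exact pvShape_pvSet2 hsh' (by omega) _
    · intro i j hi hj
      rw [pvG_pvSet2 hsh' (show R+1 < n+1 by omega) (show C+1 < n+1 by omega) _ i j]
      rw [hnew]
      by_cases hij : i = R+1 ∧ j = C+1
      · rw [if_pos hij, if_pos (Or.inr ⟨hij.1, by omega⟩), hij.1, hij.2]
      · rw [if_neg hij, hval' i j hi hj]
        have hij' : ¬ (i = R+1 ∧ j = C+1) := hij
        split_ifs with h1 h2 <;> first | rfl | (exfalso; omega)

-- row pass: the whole filling loop, first R rows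
lemma pvRowPass (grid : List (List Int)) (n : Nat) :
    ∀ (R : Nat), R ≤ n →
    pvShape ((List.range R).foldl
        (fun t r => (List.range n).foldl
          (fun t c => pvSet2 t (r+1) (c+1)
            (pvG grid r c + pvG t r (c+1) + pvG t (r+1) c - pvG t r c)) t)
        (List.replicate (n+1) (List.replicate (n+1) 0))) (n+1) ∧
    ∀ i j, i ≤ n → j ≤ n →
      pvG ((List.range R).foldl
        (fun t r => (List.range n).foldl
          (fun t c => pvSet2 t (r+1) (c+1)
            (pvG grid r c + pvG t r (c+1) + pvG t (r+1) c - pvG t r c)) t)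
        (List.replicate (n+1) (List.replicate (n+1) 0))) i j
      = if i ≤ R then pvP grid i j else 0 := by
  intro R
  induction R with
  | zero =>
    intro _
    simp only [List.range_zero, List.foldl_nil]
    refine ⟨pvShape_replicate (n+1), ?_⟩
    intro i j hi hj
    rw [pvG_replicate]
    split_ifs with h1
    · have : i = 0 := by omega
      subst this
      simp [pvP]
    · rfl
  | succ R ih =>
    intro hR
    have hR' : R ≤ n := by omega
    obtain ⟨hsh, hval⟩ := ih hR'
    rw [List.range_succ, List.foldl_append, List.foldl_cons, List.foldl_nil]
    obtain ⟨hsh2, hval2⟩ := pvColPass grid n R (by omega) n le_rfl _ hsh hval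
    refine ⟨hsh2, ?_⟩
    intro i j hi hj
    rw [hval2 i j hi hj]
    split_ifs with h1 h2 <;> first | rfl | (exfalso; omega)

lemma pvStepA_nat (grid t : List (List Int)) (r c : Nat) :
    pvStepA grid t (1+(r:Int)) (1+(c:Int)) =
      pvSet2 t (r+1) (c+1) (pvG grid r c + pvG t r (c+1) + pvG t (r+1) c - pvG t r c) := by
  have h1 : (1+(r:Int)) - 1 = ((r:Nat):Int) := by ring
  have h2 : (1+(c:Int)) - 1 = ((c:Nat):Int) := by ring
  have h5 : (1+(r:Int)) = (((r+1:Nat)):Int) := by push_cast; ring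
  have h6 : (1+(c:Int)) = (((c+1:Nat)):Int) := by push_cast; ring
  unfold pvStepA
  rw [h1, h2, h5, h6, Int.toNat_natCast, Int.toNat_natCast, pvGet2_natCast, pvGet2_natCast,
    pvGet2_natCast, pvGet2_natCast]

lemma pvTableA_eq (N : Int) (hN : 0 ≤ N) (grid : List (List Int)) :
    pvTableA N grid = (List.range N.toNat).foldl
      (fun t r => (List.range N.toNat).foldl
        (fun t c => pvSet2 t (r+1) (c+1)
          (pvG grid r c + pvG t r (c+1) + pvG t (r+1) c - pvG t r c)) t)
      (List.replicate (N.toNat+1) (List.replicate (N.toNat+1) 0)) := by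
  unfold pvTableA
  rw [show (N+1).toNat = N.toNat + 1 from by omega]
  rw [PySem.List.pyRange_one]
  rw [show ((N+1)-1).toNat = N.toNat from by omega]
  rw [List.foldl_map]
  simp only [List.foldl_map, pvStepA_nat]

lemma pvTableA_get (N : Int) (hN : 0 ≤ N) (grid : List (List Int)) (i j : Nat)
    (hi : i ≤ N.toNat) (hj : j ≤ N.toNat) :
    pvG (pvTableA N grid) i j = pvP grid i j := by
  rw [pvTableA_eq N hN grid]
  rw [(pvRowPass grid N.toNat N.toNat le_rfl).2 i j hi hj]
  rw [if_pos hi]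

theorem min_waste_in_area_spec : Claim_equal_min_waste_in_area := by
  intro N K grid _hdom hpre
  obtain ⟨hK, hKN, hlen, hrow⟩ := hpre
  show min_waste_in_area N K grid = min_waste_in_area_alt N K grid
  have hN : 0 ≤ N := le_trans hK hKN
  set n := N.toNat with hn
  set k := K.toNat with hk
  have hKk : (k:Int) = K := Int.toNat_of_nonneg hK
  have hNn : (n:Int) = N := Int.toNat_of_nonneg hN
  have hkn : k ≤ n := by omega
  set w := n - k + 1 with hw
  have hwpos : 0 < w := by omega
  -- the common value list
  set LS := (List.range w).flatMap (fun r => (List.range w).map (fun c => pvS grid k r c))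
    with hLS
  have hLSne : LS ≠ [] := by
    intro h0
    rw [hLS, List.flatMap_eq_nil_iff] at h0
    have := h0 _ (List.mem_range.mpr hwpos)
    rw [List.map_eq_nil_iff, List.range_eq_nil] at this
    omega
  -- ===== A's value: the inclusion-exclusion totals are the block sums pvS =====
  have hA : min_waste_in_area N K grid = (LS.foldl pvMinStep none).getD 0 := by
    have hrange : PySem.List.pyRange K (N+1) 1
        = (List.range w).map (fun x : Nat => K + (x:Int)) := by
      rw [PySem.List.pyRange_one]
      rw [show ((N+1)-K).toNat = w from by omega]
    simp only [min_waste_in_area, hrange, List.foldl_map]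
    rw [foldl_nested_min, hLS]
    refine congrArg (fun l : List Int => (l.foldl pvMinStep none).getD 0) ?_
    apply pvFlatMap_congr
    intro r hr c hc
    have e1 : K + (r:Int) = (((k+r:Nat)):Int) := by push_cast [hKk]; ring
    have e2 : K + (r:Int) - K = ((r:Nat):Int) := by ring
    have e3 : K + (c:Int) = (((k+c:Nat)):Int) := by push_cast [hKk]; ring
    have e4 : K + (c:Int) - K = ((c:Nat):Int) := by ring
    rw [e2, e4, e1, e3]
    rw [pvGet2_natCast, pvGet2_natCast, pvGet2_natCast, pvGet2_natCast]
    rw [pvTableA_get N hN grid _ _ (by omega) (by omega),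
        pvTableA_get N hN grid _ _ (by omega) (by omega),
        pvTableA_get N hN grid _ _ (by omega) (by omega),
        pvTableA_get N hN grid _ _ (by omega) (by omega)]
    rw [show k + r = r + k from Nat.add_comm k r, show k + c = c + k from Nat.add_comm k c]
    exact pvP_block grid k r c
  -- ===== B's value: the rolling window sums also produce the block sums pvS =====
  have hB : min_waste_in_area_alt N K grid = (PySem.List.min? LS (fun y => y)).getD 0 := by
    have hWw : N - K + 1 = ((w:Nat):Int) := by omega
    simp only [min_waste_in_area_alt, hWw, PySem.List.pyRange_zero_nat]
    rw [← hNn, ← hKk]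
    simp only [PySem.List.pyRange_zero_nat, List.foldl_map,
      PySem.List.foldl_append_singleton_eq_map, List.nil_append, List.flatMap_map, List.map_map]
    rw [hLS]
    refine congrArg (fun l : List Int => (PySem.List.min? l (fun y => y)).getD 0) ?_
    apply pvFlatMap_congr
    intro r hr c hc
    simp only [Function.comp_def]
    have hcast : ∀ t : Nat, ((r:Int) + (t:Int)) = (((r+t:Nat)):Int) := by
      intro t; push_cast; ring
    simp only [hcast, pvGet2_natCast]
    unfold pvS
    apply congrArg
    apply List.map_congr_left
    intro t ht
    have htk : t < k := List.mem_range.mp ht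
    have hrt : r + t < n := by omega
    -- the (r+t)-th row of B's intermediate table h is the list of window sums
    have hrow2 : (PySem.List.pyGet? grid ((((r+t:Nat)):Int))).getD [] = grid.getD (r+t) [] := by
      rw [PySem.List.pyGet?_natCast, List.getD_eq_getElem?_getD]
    have hinner : PySem.List.pyRange ((k:Nat):Int) ((n:Nat):Int) 1
        = (List.range (n-k)).map (fun c : Nat => ((k:Nat):Int) + (c:Int)) := by
      rw [PySem.List.pyRange_one]
      rw [show (((n:Nat):Int) - ((k:Nat):Int)).toNat = n - k from by omega]
    have hcast2 : ∀ c : Nat, ((k:Nat):Int) + (c:Int) = (((k+c:Nat)):Int) := by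
      intro c; push_cast; ring
    have hcast3' : ∀ c : Nat, (((k+c:Nat)):Int) - ((k:Nat):Int) = ((c:Nat):Int) := by
      intro c; push_cast; ring
    have hGetI : ∀ (xs : List Int) (a : Nat), pvGetI xs ((a:Nat):Int) = xs.getD a 0 := by
      intro xs a
      rw [pvGetI, PySem.List.pyGet?_natCast, List.getD_eq_getElem?_getD]
    simp only [pvG]
    rw [PySem.List.getD_map_range _ n (r+t) _ hrt]
    rw [hinner, List.foldl_map]
    simp only [hrow2, hcast2, hcast3', hGetI, ← pvWin_zero]
    rw [pvRollFold (grid.getD (r+t) []) k (n-k)]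
    have hfin := PySem.List.getD_map_range (pvWin (grid.getD (r+t) []) k) (n-k+1) c (0:Int)
      (by omega)
    simp only [hfin]
    rfl
  rw [hA, hB]
  obtain ⟨x, t, hxt⟩ := List.exists_cons_of_ne_nil hLSne
  rw [hxt, List.foldl_cons, PySem.List.min?_id_cons]
  have hms : pvMinStep none x = some x := rfl
  rw [hms, foldl_pvMinStep_some]
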